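-- pv_equiv track=rewrite | github.com/jrgavilanes/pythonProjects | 00-Playground/02-typer cli example/main.py | curated_url
-- ===== SOURCE A (Python) =====
-- def curated_url(url: str) -> str:
--     valid_caracters = "abcdefghijklmnopqrstuvwxyz_-0123456789"
--     result = ""
--     for c in url.lower():
--         if c in valid_caracters:
--             result += c
--         else:
--             result += "_"
--     return result
-- ===== SOURCE B (Python) =====
-- import re
--
-- def curated_url(url: str) -> str:
--     return re.sub(r'[^a-z0-9_-]', '_', url.lower())
-- ===== Notes on version B (the rewrite author's own statement) =====
-- stated objective: idiomatic
-- what changed: Replaced the explicit character loop with string-concatenation accumulator and a membership scan of a 38-character string by a single regex substitution over the lowered string.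
import Mathlib
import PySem

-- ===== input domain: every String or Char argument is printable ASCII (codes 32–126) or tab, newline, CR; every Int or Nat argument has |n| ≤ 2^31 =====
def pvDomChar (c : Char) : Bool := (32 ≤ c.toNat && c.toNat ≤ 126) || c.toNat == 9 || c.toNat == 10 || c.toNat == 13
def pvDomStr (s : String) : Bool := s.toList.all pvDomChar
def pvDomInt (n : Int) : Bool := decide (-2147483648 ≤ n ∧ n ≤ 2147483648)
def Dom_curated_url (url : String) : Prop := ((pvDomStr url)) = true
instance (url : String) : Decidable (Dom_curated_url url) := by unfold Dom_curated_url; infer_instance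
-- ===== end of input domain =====

-- B replaces A's explicit loop + accumulator + membership scan with one regex-style
-- per-character class substitution over the lowered string (more idiomatic, same cost).


-- ===== PORT A =====
-- 'c in valid_caracters' for a single character c is character membership (exact for 1-char needles)
def curated_url (url : String) : String :=
  let valid_caracters := "abcdefghijklmnopqrstuvwxyz_-0123456789"
  String.ofList ((PySem.Str.lower url).toList.foldl
    (fun result c =>
      if valid_caracters.toList.contains c then result ++ [c] else result ++ ['_']) [])

-- ===== PORT B =====
-- the regex character class [a-z0-9_-] of Source B, as a per-character predicate
def pvMatchClass (c : Char) : Bool :=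
  ('a' ≤ c && c ≤ 'z') || ('0' ≤ c && c ≤ '9') || c == '_' || c == '-'

-- re.sub(r'[^a-z0-9_-]', '_', url.lower()): replace each non-matching character by '_'
def curated_url_alt (url : String) : String :=
  String.ofList ((PySem.Str.lower url).toList.map (fun c => if pvMatchClass c then c else '_'))

-- ===== PRECONDITION & SPEC =====
def Spec_curated_url (url : String) (out : String) : Prop := out = curated_url_alt url
instance (url : String) (out : String) : Decidable (Spec_curated_url url out) := by unfold Spec_curated_url; infer_instance

-- ===== CLAIM (what is proved, stated in full; the proofs are below) =====
def Claim_equal_curated_url : Prop := ∀ (url : String), Dom_curated_url url → Spec_curated_url url (curated_url url)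

-- ===== LEMMAS AND PROOFS =====

-- the two per-character tests agree on every character with code < 128
theorem pv_tests_agree : ∀ n, n < 128 →
    ((("abcdefghijklmnopqrstuvwxyz_-0123456789" : String).toList.contains
        (PySem.Chars.lowerChar (Char.ofNat n))) =
      pvMatchClass (PySem.Chars.lowerChar (Char.ofNat n))) := by
  set_option maxRecDepth 4000 in decide

theorem pv_dom_lt (c : Char) (h : pvDomChar c = true) : c.toNat < 128 := by
  simp [pvDomChar] at h; omega

theorem curated_url_spec_aux (url : String) (hdom : Dom_curated_url url) :
    curated_url url = curated_url_alt url := by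
  unfold curated_url curated_url_alt
  have hfold :
      (fun (result : List Char) (c : Char) =>
          if ("abcdefghijklmnopqrstuvwxyz_-0123456789" : String).toList.contains c then
            result ++ [c] else result ++ ['_'])
        = (fun result c => result ++
            [if ("abcdefghijklmnopqrstuvwxyz_-0123456789" : String).toList.contains c then c
             else '_']) := by
    funext result c; split <;> rfl
  simp only [hfold, PySem.List.foldl_append_singleton_eq_map, List.nil_append]
  congr 1
  have hl : (PySem.Str.lower url).toList = url.toList.map PySem.Chars.lowerChar := by
    simp [PySem.Chars.lower]
  rw [hl, List.map_map, List.map_map]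
  apply List.map_congr_left
  intro c hc
  have hdc : pvDomChar c = true := by
    have := hdom; unfold Dom_curated_url pvDomStr at this
    exact List.all_eq_true.mp this c hc
  have hlt : c.toNat < 128 := pv_dom_lt c hdc
  have := pv_tests_agree c.toNat hlt
  rw [Char.ofNat_toNat] at this
  simp only [Function.comp_apply, this]

-- ===== VERDICT (by name: the statement is the Claim_ definition above) =====
theorem curated_url_spec : Claim_equal_curated_url := by
  intro url hdom
  unfold Spec_curated_url
  exact curated_url_spec_aux url hdom
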